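-- pv_equiv track=rewrite | github.com/akirasoft1/discord-article-bot | agent-sidecar/src/log_partition.py | partition_logs
-- ===== SOURCE A (Python) =====
-- STDERR_PREFIX = "__SBSTDERR__:"
--
-- def partition_logs(raw: str) -> tuple[str, str]:
--     if not raw:
--         return "", ""
--     stdout_parts: list[str] = []
--     stderr_parts: list[str] = []
--     has_trailing_newline = raw.endswith("\n")
--     lines = raw.split("\n")
--     # split("\n") on "a\nb" gives ["a", "b"] — 2 items, no trailing newline.
--     # split("\n") on "a\nb\n" gives ["a", "b", ""] — last item is empty sentinel.
--     # The last item in each case should NOT receive a trailing "\n" unless it was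
--     # present in the original (i.e. has_trailing_newline).
--     last_idx = len(lines) - 1
--     for i, line in enumerate(lines):
--         is_last = i == last_idx
--         # Skip the empty sentinel produced by a trailing newline
--         if is_last and has_trailing_newline and line == "":
--             break
--         terminator = "\n" if (not is_last or has_trailing_newline) else ""
--         if line.startswith(STDERR_PREFIX):
--             stderr_parts.append(line[len(STDERR_PREFIX):] + terminator)
--         else:
--             stdout_parts.append(line + terminator)
--     return "".join(stdout_parts), "".join(stderr_parts)
-- ===== SOURCE B (Python) =====
-- STDERR_PREFIX = "__SBSTDERR__:"
--
-- def partition_logs(raw: str) -> tuple[str, str]: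
--     stdout_parts: list[str] = []
--     stderr_parts: list[str] = []
--
--     def flush(chunk: str) -> None:
--         # chunk carries its own trailing "\n" (or none for the final line)
--         if chunk.startswith(STDERR_PREFIX):
--             stderr_parts.append(chunk[len(STDERR_PREFIX):])
--         else:
--             stdout_parts.append(chunk)
--
--     cur = ""
--     for ch in raw:
--         cur += ch
--         if ch == "\n":
--             flush(cur)
--             cur = ""
--     if cur:
--         flush(cur)
--     return "".join(stdout_parts), "".join(stderr_parts)
-- ===== Notes on version B (the rewrite author's own statement) =====
-- stated objective: simpler
-- what changed: Replaces split + enumerate + last-index/terminator arithmetic + sentinel break by a single character pass that buffers the current line, flushing it (terminator attached) each time a newline character is consumed, plus one final flush for an unterminated last line.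
import Mathlib
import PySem

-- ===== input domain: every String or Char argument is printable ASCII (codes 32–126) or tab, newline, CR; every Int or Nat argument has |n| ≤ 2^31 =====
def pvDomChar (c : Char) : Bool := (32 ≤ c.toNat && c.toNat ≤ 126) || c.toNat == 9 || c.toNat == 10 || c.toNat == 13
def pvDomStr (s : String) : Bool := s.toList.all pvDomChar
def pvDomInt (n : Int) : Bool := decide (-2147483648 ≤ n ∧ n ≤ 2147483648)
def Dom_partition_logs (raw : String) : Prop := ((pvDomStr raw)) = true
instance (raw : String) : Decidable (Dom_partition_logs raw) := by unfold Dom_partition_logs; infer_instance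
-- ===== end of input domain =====

-- B replaces A's split + enumerate + last-index/terminator arithmetic + sentinel break by a
-- single character pass that buffers the current line (terminator attached) and flushes it
-- each time a newline character is consumed, plus once at the end; simpler decomposition.

def pvPrefix : List Char := ['_', '_', 'S', 'B', 'S', 'T', 'D', 'E', 'R', 'R', '_', '_', ':']

-- ===== PORT A =====
def loopA (hnl : Bool) (lastIdx : Int) :
    List (Int × List Char) → List (List Char) × List (List Char) →
    List (List Char) × List (List Char)
  | [], st => st
  | (i, line) :: rest, (so, se) =>
    if (i == lastIdx) && hnl && (line == []) then (so, se)
    else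
      if PySem.Chars.startswith line pvPrefix then
        loopA hnl lastIdx rest
          (so, se ++ [PySem.Chars.slice line (some 13) none ++
                        (if (!(i == lastIdx)) || hnl then ['\n'] else [])])
      else
        loopA hnl lastIdx rest
          (so ++ [line ++ (if (!(i == lastIdx)) || hnl then ['\n'] else [])], se)

def partition_logs (raw : String) : String × String :=
  let cs := raw.toList
  if cs = [] then ("", "")
  else
    let hnl := PySem.Chars.endswith cs ['\n']
    let lines := PySem.Chars.splitOn cs ['\n']
    let lastIdx : Int := (lines.length : Int) - 1
    let st := loopA hnl lastIdx (PySem.List.enumerate lines 0) ([], [])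
    (String.ofList (PySem.Chars.join [] st.1), String.ofList (PySem.Chars.join [] st.2))

-- ===== PORT B =====
def flushChunk (st : List (List Char) × List (List Char)) (chunk : List Char) :
    List (List Char) × List (List Char) :=
  if PySem.Chars.startswith chunk pvPrefix then
    (st.1, st.2 ++ [PySem.Chars.slice chunk (some 13) none])
  else
    (st.1 ++ [chunk], st.2)

def stepB (acc : (List (List Char) × List (List Char)) × List Char) (ch : Char) :
    (List (List Char) × List (List Char)) × List Char :=
  if ch == '\n' then (flushChunk acc.1 (acc.2 ++ [ch]), []) else (acc.1, acc.2 ++ [ch])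

def partition_logs_alt (raw : String) : String × String :=
  let acc := raw.toList.foldl stepB (([], []), [])
  let st := if acc.2 ≠ [] then flushChunk acc.1 acc.2 else acc.1
  (String.ofList (PySem.Chars.join [] st.1), String.ofList (PySem.Chars.join [] st.2))

-- ===== PRECONDITION & SPEC =====
def Spec_partition_logs (raw : String) (out : String × String) : Prop := out = partition_logs_alt raw
instance (raw : String) (out : String × String) : Decidable (Spec_partition_logs raw out) := by unfold Spec_partition_logs; infer_instance

-- ===== CLAIM (what is proved, stated in full; the proofs are below) =====
def Claim_equal_partition_logs : Prop := ∀ (raw : String), Dom_partition_logs raw → Spec_partition_logs raw (partition_logs raw)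

-- ===== LEMMAS AND PROOFS =====

/-- Split a char list at every newline (separators dropped), Python `split("\n")` style. -/
def sp : List Char → List (List Char)
  | [] => [[]]
  | c :: rest =>
    if c = '\n' then [] :: sp rest
    else
      match sp rest with
      | [] => [[c]]
      | h :: t => (c :: h) :: t

lemma sp_ne_nil (cs : List Char) : sp cs ≠ [] := by
  cases cs with
  | nil => simp [sp]
  | cons c rest =>
    simp only [sp]
    split
    · simp
    · split <;> simp_all

lemma sp_nl (rest : List Char) : sp ('\n' :: rest) = [] :: sp rest := by simp [sp]

lemma sp_cons {c : Char} (hc : c ≠ '\n') {rest : List Char} {h : List Char}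
    {t : List (List Char)} (hsp : sp rest = h :: t) : sp (c :: rest) = (c :: h) :: t := by
  simp [sp, hc, hsp]

/-- Reattach a buffer to the first piece. -/
def prependFirst (b : List Char) : List (List Char) → List (List Char)
  | [] => [b]
  | h :: t => (b ++ h) :: t

lemma splitOn_go_spec (fuel : Nat) :
    ∀ (l cur : List Char) (acc : List (List Char)), l.length < fuel →
      PySem.Chars.splitOn.go ['\n'] fuel l cur acc =
        acc.reverse ++ prependFirst cur.reverse (sp l) := by
  induction fuel with
  | zero => intro l cur acc h; omega
  | succ f ih =>
    intro l cur acc h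
    cases l with
    | nil => simp [PySem.Chars.splitOn.go, sp, prependFirst]
    | cons c rest =>
      by_cases hc : c = '\n'
      · subst hc
        rw [show PySem.Chars.splitOn.go ['\n'] (f+1) ('\n' :: rest) cur acc =
              PySem.Chars.splitOn.go ['\n'] f (List.drop 1 ('\n' :: rest)) [] (cur.reverse :: acc) from by
              simp [PySem.Chars.splitOn.go]]
        rw [ih _ _ _ (by simpa using Nat.lt_of_succ_lt_succ h)]
        rw [sp_nl]
        cases hsp : sp rest with
        | nil => exact absurd hsp (sp_ne_nil rest)
        | cons h0 t0 => simp [prependFirst, hsp]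
      · rw [show PySem.Chars.splitOn.go ['\n'] (f+1) (c :: rest) cur acc =
              PySem.Chars.splitOn.go ['\n'] f rest (c :: cur) acc from by
              simp [PySem.Chars.splitOn.go, List.isPrefixOf]
              exact fun hh => absurd hh.symm hc]
        rw [ih _ _ _ (by simpa using Nat.lt_of_succ_lt_succ h)]
        cases hsp : sp rest with
        | nil => exact absurd hsp (sp_ne_nil rest)
        | cons h0 t0 => rw [sp_cons hc hsp]; simp [prependFirst]

lemma splitOn_eq_sp (cs : List Char) : PySem.Chars.splitOn cs ['\n'] = sp cs := by
  have h := splitOn_go_spec (cs.length + 1) cs [] [] (by omega)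
  rw [PySem.Chars.splitOn, h]
  cases hsp : sp cs with
  | nil => exact absurd hsp (sp_ne_nil cs)
  | cons h0 t0 => simp [prependFirst]

lemma sp_length (cs : List Char) : (sp cs).length = cs.count '\n' + 1 := by
  induction cs with
  | nil => simp [sp]
  | cons c rest ih =>
    by_cases hc : c = '\n'
    · subst hc; simp [sp_nl, ih]
    · cases hsp : sp rest with
      | nil => exact absurd hsp (sp_ne_nil rest)
      | cons h0 t0 =>
        rw [sp_cons hc hsp, List.count_cons]
        rw [hsp] at ih
        simp_all

lemma sp_last_nil_iff (cs : List Char) :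
    (sp cs).getLast? = some [] ↔ (cs = [] ∨ ['\n'] <:+ cs) := by
  induction cs with
  | nil => simp [sp]
  | cons c rest ih =>
    by_cases hc : c = '\n'
    · subst hc
      rw [sp_nl]
      cases hsp : sp rest with
      | nil => exact absurd hsp (sp_ne_nil rest)
      | cons h0 t0 =>
        rw [List.getLast?_cons_cons]
        rw [hsp] at ih
        cases rest with
        | nil =>
          simp [sp] at hsp
          simp [hsp.1, hsp.2, List.suffix_cons_iff]
        | cons r rs =>
          rw [ih]
          constructor
          · rintro (h | h)
            · exact Or.inr (List.suffix_cons_iff.mpr (Or.inl (by simp [h])))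
            · exact Or.inr (List.suffix_cons_iff.mpr (Or.inr h))
          · rintro (h | h)
            · exact absurd h (by simp)
            · rcases List.suffix_cons_iff.mp h with h1 | h1
              · exact Or.inl (by simpa using h1.symm)
              · exact Or.inr h1
    · cases hsp : sp rest with
      | nil => exact absurd hsp (sp_ne_nil rest)
      | cons h0 t0 =>
        rw [sp_cons hc hsp]
        cases t0 with
        | nil =>
          have hcount : rest.count '\n' = 0 := by
            have hl := sp_length rest; rw [hsp] at hl; simpa using hl
          have hnotmem : '\n' ∉ rest := by
            simpa [List.count_eq_zero] using hcount
          simp only [List.getLast?_singleton]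
          constructor
          · intro h; simp at h
          · rintro (h | h)
            · simp at h
            · rcases List.suffix_cons_iff.mp h with h1 | h1
              · exact absurd (by injection h1 with h2 _; exact h2.symm) hc
              · exact absurd (h1.subset (by simp)) hnotmem
        | cons t1 ts =>
          rw [List.getLast?_cons_cons, ← List.getLast?_cons_cons (a := h0)]
          rw [hsp] at ih
          rw [ih]
          constructor
          · rintro (h | h)
            · subst h; simp [sp] at hsp
            · exact Or.inr (List.suffix_cons_iff.mpr (Or.inr h))
          · rintro (h | h)
            · exact absurd h (by simp)
            · rcases List.suffix_cons_iff.mp h with h1 | h1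
              · exact absurd (by injection h1 with h2 _; exact h2.symm) hc
              · exact Or.inr h1

/-- Chunks with terminators attached: B's view of the lines. -/
def chunkify (ls : List (List Char)) : List (List Char) :=
  (ls.dropLast).map (· ++ ['\n']) ++
    (match ls.getLast? with
     | some [] => []
     | some l => [l]
     | none => [])

/-- A's view of the lines: the last one kept/terminated according to hnl. -/
def chunkifyA (hnl : Bool) (ls : List (List Char)) : List (List Char) :=
  (ls.dropLast).map (· ++ ['\n']) ++
    (match ls.getLast? with
     | none => []
     | some l => if hnl then (if l = [] then [] else [l ++ ['\n']]) else [l])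

lemma chunkify_cons_cons (a b : List Char) (l : List (List Char)) :
    chunkify (a :: b :: l) = (a ++ ['\n']) :: chunkify (b :: l) := by
  simp [chunkify, List.getLast?_cons_cons]

lemma chunkifyA_cons_cons (hnl : Bool) (a b : List Char) (l : List (List Char)) :
    chunkifyA hnl (a :: b :: l) = (a ++ ['\n']) :: chunkifyA hnl (b :: l) := by
  simp [chunkifyA, List.getLast?_cons_cons]

lemma pvPrefix_no_nl : '\n' ∉ pvPrefix := by decide

lemma startswith_append_nl (l : List Char) :
    PySem.Chars.startswith (l ++ ['\n']) pvPrefix = PySem.Chars.startswith l pvPrefix := by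
  by_cases h : pvPrefix <+: l
  · rw [(PySem.Chars.startswith_iff _ _).mpr (h.trans (List.prefix_append _ _)),
        (PySem.Chars.startswith_iff _ _).mpr h]
  · have h2 : ¬ pvPrefix <+: (l ++ ['\n']) := by
      intro hp
      have hlen : pvPrefix.length ≤ l.length + 1 := by simpa using hp.length_le
      rcases List.prefix_or_prefix_of_prefix hp (List.prefix_append l ['\n']) with h1 | h1
      · exact h h1
      · have hll : l.length ≤ pvPrefix.length := h1.length_le
        by_cases he : l.length = pvPrefix.length
        · exact h (h1.eq_of_length he ▸ List.prefix_refl _)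
        · have heq : pvPrefix = l ++ ['\n'] := hp.eq_of_length (by simp; omega)
          exact pvPrefix_no_nl (heq ▸ (by simp : '\n' ∈ l ++ ['\n']))
    have e1 : PySem.Chars.startswith (l ++ ['\n']) pvPrefix = false :=
      Bool.eq_false_iff.mpr (fun hb => h2 ((PySem.Chars.startswith_iff _ _).mp hb))
    have e2 : PySem.Chars.startswith l pvPrefix = false :=
      Bool.eq_false_iff.mpr (fun hb => h ((PySem.Chars.startswith_iff _ _).mp hb))
    rw [e1, e2]
  
lemma flush_chunk (st : List (List Char) × List (List Char)) (l : List Char) :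
    flushChunk st (l ++ ['\n']) =
      if PySem.Chars.startswith l pvPrefix then
        (st.1, st.2 ++ [PySem.Chars.slice l (some 13) none ++ ['\n']])
      else (st.1 ++ [l ++ ['\n']], st.2) := by
  rw [flushChunk, startswith_append_nl]
  by_cases h : PySem.Chars.startswith l pvPrefix = true
  · have hpre : pvPrefix <+: l := (PySem.Chars.startswith_iff _ _).mp h
    have hlen : (13:Nat) ≤ l.length := by simpa using hpre.length_le
    have h13 : PySem.List.slice (l ++ ['\n']) (some 13) none =
        PySem.List.slice l (some 13) none ++ ['\n'] := by
      rw [show ((13:Int)) = ((13:Nat) : Int) by norm_num,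
          PySem.List.slice_from_natCast, PySem.List.slice_from_natCast]
      exact List.drop_append_of_le_length hlen
    simp [h, PySem.Chars.slice_eq_listSlice, h13]
  · simp [h]

lemma loopA_spec (hnl : Bool) (N : Nat) :
    ∀ (ls : List (List Char)) (i : Nat) (st : List (List Char) × List (List Char)),
      ls ≠ [] → i + ls.length = N →
      loopA hnl ((N : Int) - 1) (PySem.List.enumerate ls (i : Int)) st =
        (chunkifyA hnl ls).foldl flushChunk st := by
  intro ls
  induction ls with
  | nil => intro i st h; exact absurd rfl h
  | cons l ls' ih =>
    intro i st _ hN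
    cases ls' with
    | nil =>
      have hi : ((i : Int) == (N : Int) - 1) = true := by
        simp only [List.length_cons, List.length_nil] at hN
        simp only [beq_iff_eq]; omega
      obtain ⟨so, se⟩ := st
      rw [PySem.List.enumerate_cons, PySem.List.enumerate_nil]
      cases hh : hnl with
      | true =>
        by_cases hl : l = []
        · subst hl
          simp [loopA, hi, chunkifyA]
        · rw [show loopA true ((N:Int)-1) [((i:Int), l)] (so, se) =
                flushChunk (so, se) (l ++ ['\n']) from by
              rw [flush_chunk]
              by_cases hs : PySem.Chars.startswith l pvPrefix = true <;>
                simp [loopA, hi, hs, hl, flushChunk]]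
          simp [chunkifyA, hl]
      | false =>
        rw [show loopA false ((N:Int)-1) [((i:Int), l)] (so, se) =
              flushChunk (so, se) l from by
            by_cases hs : PySem.Chars.startswith l pvPrefix = true <;>
              simp [loopA, hi, hs, flushChunk]]
        simp [chunkifyA]
    | cons l1 ls2 =>
      have hi : ((i : Int) == (N : Int) - 1) = false := by
        simp only [List.length_cons] at hN
        simp only [beq_eq_false_iff_ne, ne_eq]; omega
      obtain ⟨so, se⟩ := st
      rw [PySem.List.enumerate_cons]
      rw [show ((i : Int) + 1) = (((i+1 : Nat)) : Int) by push_cast; ring]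
      rw [show loopA hnl ((N:Int)-1) (((i:Int), l) :: PySem.List.enumerate (l1 :: ls2) ((i+1:Nat):Int)) (so, se) =
            loopA hnl ((N:Int)-1) (PySem.List.enumerate (l1 :: ls2) ((i+1:Nat):Int))
              (flushChunk (so, se) (l ++ ['\n'])) from by
          rw [flush_chunk]
          by_cases hs : PySem.Chars.startswith l pvPrefix = true <;>
            simp [loopA, hi, hs, flushChunk]]
      rw [ih (i+1) _ (by simp) (by simp only [List.length_cons] at hN ⊢; omega)]
      rw [chunkifyA_cons_cons, List.foldl_cons]

lemma B_inv : ∀ (cs : List Char) (st : List (List Char) × List (List Char)) (cur : List Char),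
    (fun acc => if acc.2 ≠ [] then flushChunk acc.1 acc.2 else acc.1) (cs.foldl stepB (st, cur)) =
      (chunkify (prependFirst cur (sp cs))).foldl flushChunk st := by
  intro cs
  induction cs with
  | nil =>
    intro st cur
    by_cases h : cur = [] <;> simp [sp, prependFirst, chunkify, h]
  | cons c cs' ih =>
    intro st cur
    by_cases hc : c = '\n'
    · subst hc
      rw [List.foldl_cons, show stepB (st, cur) '\n' = (flushChunk st (cur ++ ['\n']), []) from by
            simp [stepB]]
      rw [ih]
      rw [sp_nl]
      cases hsp : sp cs' with
      | nil => exact absurd hsp (sp_ne_nil cs')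
      | cons h0 t0 =>
        rw [show prependFirst cur ([] :: h0 :: t0) = cur :: h0 :: t0 from by simp [prependFirst]]
        rw [show prependFirst [] (h0 :: t0) = h0 :: t0 from by simp [prependFirst]]
        rw [chunkify_cons_cons, List.foldl_cons]
    · rw [List.foldl_cons, show stepB (st, cur) c = (st, cur ++ [c]) from by simp [stepB, hc]]
      rw [ih]
      cases hsp : sp cs' with
      | nil => exact absurd hsp (sp_ne_nil cs')
      | cons h0 t0 =>
        rw [sp_cons hc hsp]
        simp [prependFirst]

lemma chunkifyA_eq_chunkify (cs : List Char) (hcs : cs ≠ []) :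
    chunkifyA (PySem.Chars.endswith cs ['\n']) (sp cs) = chunkify (sp cs) := by
  cases hh : PySem.Chars.endswith cs ['\n'] with
  | true =>
    have hsuf : ['\n'] <:+ cs := (PySem.Chars.endswith_iff _ _).mp hh
    have hlast : (sp cs).getLast? = some [] := (sp_last_nil_iff cs).mpr (Or.inr hsuf)
    simp [chunkifyA, chunkify, hlast]
  | false =>
    have hnsuf : ¬ ['\n'] <:+ cs := fun h => by
      rw [(PySem.Chars.endswith_iff _ _).mpr h] at hh; cases hh
    cases hlast : (sp cs).getLast? with
    | none => simp [chunkifyA, chunkify, hlast]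
    | some l =>
      cases l with
      | nil =>
        rcases (sp_last_nil_iff cs).mp hlast with h | h
        · exact absurd h hcs
        · exact absurd h hnsuf
      | cons x xs => simp [chunkifyA, chunkify, hlast]

-- ===== VERDICT (by name: the statement is the Claim_ definition above) =====
theorem partition_logs_spec : Claim_equal_partition_logs := by
  intro raw _
  unfold Spec_partition_logs partition_logs partition_logs_alt
  cases hcs : raw.toList with
  | nil => simp [PySem.Chars.join, List.intercalate]
  | cons c cs' =>
    rw [if_neg (by simp : ¬ (c :: cs' = ([] : List Char)))]
    dsimp only
    have hB := B_inv (c :: cs') ([], []) []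
    simp only [] at hB
    rw [hB]
    rw [splitOn_eq_sp]
    have hlen : (sp (c :: cs')).length = ((c :: cs').count '\n') + 1 := sp_length _
    have hA := loopA_spec (PySem.Chars.endswith (c :: cs') ['\n']) (sp (c :: cs')).length
      (sp (c :: cs')) 0 ([], []) (sp_ne_nil _) (by simp)
    simp only [Nat.cast_zero] at hA
    rw [hA]
    rw [chunkifyA_eq_chunkify _ (by simp)]
    rw [show prependFirst [] (sp (c :: cs')) = sp (c :: cs') from by
      cases hsp : sp (c :: cs') with
      | nil => exact absurd hsp (sp_ne_nil _)
      | cons h0 t0 => simp [prependFirst]]
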